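-- pv_equiv track=rewrite | github.com/OnyX0000/coding_test | Python3/프로그래머스/2/60058. 괄호 변환/괄호 변환.py | solution
-- ===== SOURCE A (Python) =====
-- def is_correct(s: str) -> bool :
--     bal = 0
--     for ch in s :
--         bal += 1 if ch == '(' else -1
--         if bal < 0 :
--             return False
--     return bal == 0
--
-- def split_uv(w: str) :
--     bal = 0
--     for i, ch in enumerate(w) :
--         bal += 1 if ch == '(' else -1
--         if bal == 0 :
--             return w[:i + 1], w[i + 1:]
--     return w, ""  # 문제 조건상 여기 도달하지 않음
--
-- def flip(s: str) -> str :
--     return ''.join('(' if ch == ')' else ')' for ch in s)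
--
-- def solution(p: str) -> str :
--     if not p :
--         return ""
--     if is_correct(p) :
--         return p
--
--     u, v = split_uv(p)
--     if is_correct(u) :
--         return u + solution(v)
--     # 규칙 4
--     return "(" + solution(v) + ")" + flip(u[1 : -1])
-- ===== SOURCE B (Python) =====
-- def solution(p: str) -> str:
--     # Iterative pass: decompose into primitive balanced blocks left to
--     # right, emit correct blocks directly, and defer each rule-4 tail segment
--     # on a stack joined at the end.
--     out = []
--     pieces = []  # deferred tails, final order is reverse of push order
--     while p:
--         bal = 0
--         neg = False
--         cut = len(p)
--         for i, ch in enumerate(p):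
--             bal += 1 if ch == '(' else -1
--             if bal < 0:
--                 neg = True
--             if bal == 0:
--                 cut = i + 1
--                 break
--         u, p = p[:cut], p[cut:]
--         if not neg and bal == 0:
--             out.append(u)
--         else:
--             out.append('(')
--             pieces.append(')' + ''.join('(' if c == ')' else ')' for c in u[1:-1]))
--     return ''.join(out) + ''.join(reversed(pieces))
-- ===== Notes on version B (the rewrite author's own statement) =====
-- stated objective: alternative
-- what changed: Replaced A's top-down recursion (which re-checks the whole remaining string with is_correct at every level and rebuilds the result by nested concatenation) with a single iterative left-to-right pass over the primitive balanced blocks, emitting correct blocks directly and deferring each rule-4 tail segment on a stack joined once at the end.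
import Mathlib
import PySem

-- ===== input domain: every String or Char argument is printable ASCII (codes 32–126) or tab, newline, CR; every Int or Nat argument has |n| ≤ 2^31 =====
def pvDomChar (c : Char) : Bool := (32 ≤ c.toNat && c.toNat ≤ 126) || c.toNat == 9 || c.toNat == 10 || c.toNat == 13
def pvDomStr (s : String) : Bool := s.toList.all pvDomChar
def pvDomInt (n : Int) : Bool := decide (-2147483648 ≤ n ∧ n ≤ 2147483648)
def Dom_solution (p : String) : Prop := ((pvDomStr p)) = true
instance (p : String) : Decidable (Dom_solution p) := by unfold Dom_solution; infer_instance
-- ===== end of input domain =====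

-- B replaces A's top-down recursion (which re-checks the whole remainder with
-- is_correct at every level) by one iterative left-to-right pass over the primitive
-- balanced blocks, deferring rule-4 tail segments on a stack (alternative algorithm).

-- ===== PORT A =====

-- the ternary '1 if ch == '(' else -1'
def deltaA (ch : Char) : Int := if ch == '(' then 1 else -1

-- is_correct: bal accumulator, early False on bal < 0
def isCorrectA : List Char → Int → Bool
  | [], bal => bal == 0
  | ch :: rest, bal =>
    let bal := bal + deltaA ch
    if bal < 0 then false else isCorrectA rest bal

-- split_uv: acc holds w[:i] reversed; returns (w[:i+1], w[i+1:]) step for step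
def splitUvA : List Char → Int → List Char → (List Char × List Char)
  | [], _, acc => (acc.reverse, [])
  | ch :: rest, bal, acc =>
    let bal := bal + deltaA ch
    if bal == 0 then (acc.reverse ++ [ch], rest) else splitUvA rest bal (ch :: acc)

-- flip
def flipA (s : List Char) : List Char := s.map (fun ch => if ch == ')' then '(' else ')')

theorem splitUvA_snd_lt : ∀ (w : List Char) (bal : Int) (acc : List Char), w ≠ [] →
    (splitUvA w bal acc).2.length < w.length := by
  intro w
  induction w with
  | nil => intro _ _ h; exact absurd rfl h
  | cons ch rest ih =>
    intro bal acc _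
    simp only [splitUvA]
    split
    · simp
    · rcases Decidable.em (rest = []) with h | h
      · subst h; simp [splitUvA]
      · exact Nat.lt_trans (ih _ _ h) (by simp)

-- u[1:-1] is ported by hand as (drop 1).dropLast, exact for every list length
def solutionA (p : List Char) : List Char :=
  if hp : p = [] then []
  else if isCorrectA p 0 then p
  else
    let uv := splitUvA p 0 []
    if isCorrectA uv.1 0 then uv.1 ++ solutionA uv.2
    else '(' :: (solutionA uv.2 ++ ')' :: flipA ((uv.1.drop 1).dropLast))
termination_by p.length
decreasing_by all_goals exact splitUvA_snd_lt p 0 [] hp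

def solution (p : String) : String := String.mk (solutionA p.toList)

-- ===== PORT B =====

-- the ternary '1 if ch == '(' else -1'
def deltaB (ch : Char) : Int := if ch == '(' then 1 else -1

-- the inner for-loop: returns (cut, bal, neg); cut = len(s) when no break
def scanB : List Char → Int → Bool → (Nat × Int × Bool)
  | [], bal, neg => (0, bal, neg)
  | ch :: rest, bal, neg =>
    let bal := bal + deltaB ch
    let neg := neg || decide (bal < 0)
    if bal == 0 then (1, bal, neg)
    else
      let r := scanB rest bal neg
      (r.1 + 1, r.2.1, r.2.2)

def flipB (s : List Char) : List Char := s.map (fun c => if c == ')' then '(' else ')')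

theorem scanB_cut_pos : ∀ (p : List Char) (bal : Int) (neg : Bool), p ≠ [] →
    1 ≤ (scanB p bal neg).1 := by
  intro p bal neg h
  cases p with
  | nil => exact absurd rfl h
  | cons ch rest => simp only [scanB]; split <;> simp

-- the while loop; out and the deferred pieces (cons order = reverse push order)
def loopB (p : List Char) (out : List Char) (pieces : List (List Char)) : List Char :=
  if hp : p = [] then out ++ pieces.flatten
  else
    let r := scanB p 0 false
    if !r.2.2 && (r.2.1 == 0) then loopB (p.drop r.1) (out ++ p.take r.1) pieces
    else loopB (p.drop r.1) (out ++ ['(']) ((')' :: flipB (((p.take r.1).drop 1).dropLast)) :: pieces)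
termination_by p.length
decreasing_by all_goals
  · show (p.drop (scanB p 0 false).1).length < p.length
    have h1 := scanB_cut_pos p 0 false hp
    have h2 : 0 < p.length := List.length_pos_iff.mpr hp
    simp only [List.length_drop]; omega

def solution_alt (p : String) : String := String.mk (loopB p.toList [] [])

-- ===== PRECONDITION & SPEC =====
def Spec_solution (p : String) (out : String) : Prop := out = solution_alt p
instance (p : String) (out : String) : Decidable (Spec_solution p out) := by unfold Spec_solution; infer_instance

-- ===== CLAIM (what is proved, stated in full; the proofs are below) =====
def Claim_equal_solution : Prop := ∀ (p : String), Dom_solution p → Spec_solution p (solution p)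

-- ===== LEMMAS AND PROOFS =====

theorem deltaB_eq_deltaA (ch : Char) : deltaB ch = deltaA ch := rfl

-- splitUvA computes the take/drop split at scanB's cut (cut ignores neg)
theorem splitUvA_eq_scan : ∀ (p : List Char) (bal : Int) (neg : Bool) (acc : List Char),
    splitUvA p bal acc = (acc.reverse ++ p.take (scanB p bal neg).1, p.drop (scanB p bal neg).1) := by
  intro p
  induction p with
  | nil => intro bal neg acc; simp [splitUvA, scanB]
  | cons ch rest ih =>
    intro bal neg acc
    simp only [splitUvA, scanB, deltaB_eq_deltaA]
    split_ifs with h0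
    · simp
    · rw [ih (bal + deltaA ch) (neg || decide (bal + deltaA ch < 0)) (ch :: acc)]
      simp
      try rfl

theorem scanB_neg_mono : ∀ (p : List Char) (bal : Int), (scanB p bal true).2.2 = true := by
  intro p
  induction p with
  | nil => intro bal; simp [scanB]
  | cons ch rest ih =>
    intro bal
    simp only [scanB, Bool.true_or]
    split
    · rfl
    · simp [ih]

-- A's is_correct on the first block agrees with B's (not neg and bal == 0) flag
theorem isCorrectA_take_scan : ∀ (p : List Char) (bal : Int),
    isCorrectA (p.take (scanB p bal false).1) bal
      = (!(scanB p bal false).2.2 && ((scanB p bal false).2.1 == 0)) := by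
  intro p
  induction p with
  | nil => intro bal; simp [scanB, isCorrectA]
  | cons ch rest ih =>
    intro bal
    simp only [scanB, deltaB_eq_deltaA, Bool.false_or]
    by_cases h0 : bal + deltaA ch = 0
    · simp [h0, isCorrectA]
    · by_cases hneg : bal + deltaA ch < 0
      · have hmono := scanB_neg_mono rest (bal + deltaA ch)
        simp [h0, hneg, isCorrectA, hmono]
      · simp [h0, hneg, isCorrectA, ih (bal + deltaA ch)]

-- a correct string decomposes: first block flagged correct, remainder correct
theorem correct_decomp : ∀ (p : List Char) (bal : Int), isCorrectA p bal = true → p ≠ [] →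
    (!(scanB p bal false).2.2 && ((scanB p bal false).2.1 == 0)) = true
      ∧ isCorrectA (p.drop (scanB p bal false).1) 0 = true := by
  intro p
  induction p with
  | nil => intro _ _ h; exact absurd rfl h
  | cons ch rest ih =>
    intro bal hc _
    simp only [isCorrectA] at hc
    set bal' := bal + deltaA ch with hb
    have hneg : ¬ bal' < 0 := by by_contra h; simp [h] at hc
    simp only [hneg, if_false] at hc
    have hd : (decide (bal' < 0)) = false := by simpa using hneg
    simp only [scanB, deltaB_eq_deltaA, ← hb, Bool.false_or, hd]
    by_cases h0 : bal' = 0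
    · rw [h0] at hc
      simp [h0, hc]
    · have hrest : rest ≠ [] := by
        intro h; subst h; simp only [isCorrectA, beq_iff_eq] at hc; exact h0 hc
      have := ih bal' hc hrest
      simp only [beq_iff_eq, h0, if_false]
      simpa [List.drop_succ_cons] using this

-- main invariant: the loop carries out ++ solutionA p ++ flatten pieces
theorem loopB_invariant : ∀ (n : Nat) (p : List Char), p.length ≤ n →
    ∀ (out : List Char) (pieces : List (List Char)),
    loopB p out pieces = out ++ solutionA p ++ pieces.flatten := by
  intro n
  induction n with
  | zero =>
    intro p hp out pieces
    have : p = [] := List.eq_nil_of_length_eq_zero (Nat.le_zero.mp hp)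
    subst this
    rw [loopB, solutionA]; simp
  | succ n ih =>
    intro p hp out pieces
    by_cases hnil : p = []
    · subst hnil; rw [loopB, solutionA]; simp
    · rw [loopB, solutionA]
      simp only [hnil, dif_neg, not_false_iff]
      have hsplit := splitUvA_eq_scan p 0 false []
      simp only [List.reverse_nil, List.nil_append] at hsplit
      set r := scanB p 0 false with hr
      have hu1 : (splitUvA p 0 []).1 = p.take r.1 := by rw [hsplit]
      have hu2 : (splitUvA p 0 []).2 = p.drop r.1 := by rw [hsplit]
      have hcutpos : 1 ≤ r.1 := scanB_cut_pos p 0 false hnil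
      have hplen : 0 < p.length := List.length_pos_iff.mpr hnil
      have hlen : (p.drop r.1).length ≤ n := by simp only [List.length_drop]; omega
      have hflag : isCorrectA (p.take r.1) 0 = (!r.2.2 && (r.2.1 == 0)) :=
        isCorrectA_take_scan p 0
      by_cases hcor : isCorrectA p 0 = true
      · -- A returns p; B still walks the blocks
        obtain ⟨hf, hv⟩ := correct_decomp p 0 hcor hnil
        rw [← hr] at hf hv
        simp only [hcor, if_true, hf, if_true]
        rw [ih _ hlen]
        have hvcor : solutionA (p.drop r.1) = p.drop r.1 := by
          by_cases hvnil : p.drop r.1 = []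
          · rw [hvnil, solutionA]; simp
          · rw [solutionA]; simp [hvnil, hv]
        rw [hvcor]
        simp [List.append_assoc, List.take_append_drop]
      · simp only [Bool.not_eq_true] at hcor
        simp only [hcor, Bool.false_eq_true, if_false, hu1, hu2]
        by_cases hfl : (!r.2.2 && (r.2.1 == 0)) = true
        · simp only [hfl, if_true, hflag.trans hfl, if_true]
          rw [ih _ hlen]; simp [List.append_assoc]
        · simp only [Bool.not_eq_true] at hfl
          simp only [hfl, Bool.false_eq_true, if_false, hflag.trans hfl]
          rw [ih _ hlen]
          simp [flipA, flipB, List.append_assoc]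

theorem solutionA_eq_loopB (p : List Char) : solutionA p = loopB p [] [] := by
  rw [loopB_invariant p.length p (le_refl _) [] []]; simp

-- ===== VERDICT (by name: the statement is the Claim_ definition above) =====
theorem solution_spec : Claim_equal_solution := by
  intro p _
  unfold Spec_solution solution solution_alt
  rw [solutionA_eq_loopB]
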